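-- pv_equiv track=rewrite | github.com/PorkPies/musical-alignment | display/page_turner.py | _build_page_first_and_last
-- ===== SOURCE A (Python) =====
-- def _build_page_first_and_last(bar_to_page):
--     """
--     Return two dicts:
--       page_first_bar[page_idx] = smallest bar number on that page
--       page_last_bar[page_idx]  = largest bar number on that page
--     """
--     page_first_bar = {}
--     page_last_bar = {}
--     for bar_num, page_idx in bar_to_page.items():
--         if page_idx not in page_first_bar or bar_num < page_first_bar[page_idx]:
--             page_first_bar[page_idx] = bar_num
--         if page_idx not in page_last_bar or bar_num > page_last_bar[page_idx]:
--             page_last_bar[page_idx] = bar_num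
--     return page_first_bar, page_last_bar
-- ===== SOURCE B (Python) =====
-- def _build_page_first_and_last(bar_to_page):
--     # Group bar numbers by page in first-encounter order, then reduce each
--     # group with min/max in two separate passes.
--     groups = {}
--     for bar_num, page_idx in bar_to_page.items():
--         groups.setdefault(page_idx, []).append(bar_num)
--     page_first_bar = {p: min(bars) for p, bars in groups.items()}
--     page_last_bar = {p: max(bars) for p, bars in groups.items()}
--     return page_first_bar, page_last_bar
-- ===== Notes on version B (the rewrite author's own statement) =====
-- stated objective: alternative
-- what changed: Replaces the single running-update loop (conditional in-place min/max refresh per item) by a group-by accumulation pass followed by two separate min/max reduction passes over the groups.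
import Mathlib
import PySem

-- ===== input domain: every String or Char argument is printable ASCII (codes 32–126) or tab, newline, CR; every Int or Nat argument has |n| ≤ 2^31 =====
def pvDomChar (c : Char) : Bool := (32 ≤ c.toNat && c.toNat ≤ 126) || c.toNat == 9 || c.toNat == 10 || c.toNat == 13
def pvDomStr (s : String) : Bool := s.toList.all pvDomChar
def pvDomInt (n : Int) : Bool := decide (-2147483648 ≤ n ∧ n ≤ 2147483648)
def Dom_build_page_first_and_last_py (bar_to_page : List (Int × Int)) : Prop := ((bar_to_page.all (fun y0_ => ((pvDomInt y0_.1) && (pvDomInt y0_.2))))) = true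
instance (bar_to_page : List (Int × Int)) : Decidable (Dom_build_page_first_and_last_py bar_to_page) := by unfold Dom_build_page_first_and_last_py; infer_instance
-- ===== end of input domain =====

-- B re-implements the one-pass conditional running min/max update as a group-by pass
-- followed by two separate min/max reduction passes (same cost, different decomposition).

-- ===== PORT A =====
def build_page_first_and_last_py (bar_to_page : List (Int × Int)) : (List (Int × Int)) × (List (Int × Int)) :=
  (fun fl => (fl.1.items, fl.2.items))
    (bar_to_page.foldl
      (fun (fl : PySem.Dict Int Int × PySem.Dict Int Int) bp =>
        -- if page_idx not in page_first_bar or bar_num < page_first_bar[page_idx]: update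
        -- if page_idx not in page_last_bar  or bar_num > page_last_bar[page_idx]:  update
        (match fl.1.get? bp.2 with
          | none => fl.1.insert bp.2 bp.1
          | some v => if bp.1 < v then fl.1.insert bp.2 bp.1 else fl.1,
         match fl.2.get? bp.2 with
          | none => fl.2.insert bp.2 bp.1
          | some v => if v < bp.1 then fl.2.insert bp.2 bp.1 else fl.2))
      (PySem.Dict.empty, PySem.Dict.empty))

-- ===== PORT B =====
-- min(bars) / max(bars); the groups' value lists are always nonempty, so the
-- .getD 0 default is never used.
def pyMinB (l : List Int) : Int := (PySem.List.min? l (fun x => x)).getD 0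
def pyMaxB (l : List Int) : Int := (PySem.List.max? l (fun x => x)).getD 0

def build_page_first_and_last_py_alt (bar_to_page : List (Int × Int)) : (List (Int × Int)) × (List (Int × Int)) :=
  (fun groups =>
    (groups.items.map (fun pl => (pl.1, pyMinB pl.2)),
     groups.items.map (fun pl => (pl.1, pyMaxB pl.2))))
    (bar_to_page.foldl
      (fun (g : PySem.Dict Int (List Int)) bp => g.modify bp.2 [] (fun L => L ++ [bp.1]))
      PySem.Dict.empty)

-- ===== PRECONDITION & SPEC =====
def Spec_build_page_first_and_last_py (bar_to_page : List (Int × Int)) (out : (List (Int × Int)) × (List (Int × Int))) : Prop := out = build_page_first_and_last_py_alt bar_to_page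
instance (bar_to_page : List (Int × Int)) (out : (List (Int × Int)) × (List (Int × Int))) : Decidable (Spec_build_page_first_and_last_py bar_to_page out) := by unfold Spec_build_page_first_and_last_py; infer_instance

-- ===== CLAIM (what is proved, stated in full; the proofs are below) =====
def Claim_equal_build_page_first_and_last_py : Prop := ∀ (bar_to_page : List (Int × Int)), Dom_build_page_first_and_last_py bar_to_page → Spec_build_page_first_and_last_py bar_to_page (build_page_first_and_last_py bar_to_page)

-- ===== LEMMAS AND PROOFS =====

-- A's running-update step for one dict, parametric in the (strict) update test.
def pvStep (cmp : Int → Int → Prop) [DecidableRel cmp] (d : PySem.Dict Int Int) (bp : Int × Int) : PySem.Dict Int Int :=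
  match d.get? bp.2 with
  | none => d.insert bp.2 bp.1
  | some v => if cmp bp.1 v then d.insert bp.2 bp.1 else d

-- B's grouping step.
def pvGStep (g : PySem.Dict Int (List Int)) (bp : Int × Int) : PySem.Dict Int (List Int) :=
  g.modify bp.2 [] (fun L => L ++ [bp.1])

lemma pyMinB_singleton (b : Int) : pyMinB [b] = b := by
  simp [pyMinB, PySem.List.min?_id_cons]

lemma pyMaxB_singleton (b : Int) : pyMaxB [b] = b := by
  simp [pyMaxB, PySem.List.max?_id_cons]

lemma pyMinB_append (L : List Int) (b : Int) (h : L ≠ []) :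
    pyMinB (L ++ [b]) = if b < pyMinB L then b else pyMinB L := by
  cases L with
  | nil => simp at h
  | cons x t =>
    simp only [pyMinB, List.cons_append, PySem.List.min?_id_cons, List.foldl_append,
      List.foldl_cons, List.foldl_nil, Option.getD_some]
    rcases lt_or_ge b (t.foldl min x) with hlt | hge
    · rw [min_eq_right (le_of_lt hlt), if_pos hlt]
    · rw [min_eq_left hge, if_neg (not_lt.mpr hge)]

lemma pyMaxB_append (L : List Int) (b : Int) (h : L ≠ []) :
    pyMaxB (L ++ [b]) = if pyMaxB L < b then b else pyMaxB L := by
  cases L with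
  | nil => simp at h
  | cons x t =>
    simp only [pyMaxB, List.cons_append, PySem.List.max?_id_cons, List.foldl_append,
      List.foldl_cons, List.foldl_nil, Option.getD_some]
    rcases lt_or_ge (t.foldl max x) b with hlt | hge
    · rw [max_eq_right (le_of_lt hlt), if_pos hlt]
    · rw [max_eq_left hge, if_neg (not_lt.mpr hge)]

-- Invariant: A's one-dict fold tracks red ∘ (B's grouping fold), entrywise in order.
lemma pvFoldOne (cmp : Int → Int → Prop) [DecidableRel cmp] (red : List Int → Int)
    (hred1 : ∀ b, red [b] = b)
    (hred2 : ∀ L b, L ≠ [] → red (L ++ [b]) = if cmp b (red L) then b else red L)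
    (l : List (Int × Int)) (g : PySem.Dict Int (List Int)) (d : PySem.Dict Int Int)
    (hn : g.keys.Nodup)
    (hne : ∀ p ∈ g.items, p.2 ≠ [])
    (h : d.items = g.items.map (fun pl => (pl.1, red pl.2))) :
    (l.foldl (pvStep cmp) d).items
      = (l.foldl pvGStep g).items.map (fun pl => (pl.1, red pl.2)) := by
  induction l generalizing g d with
  | nil => simpa using h
  | cons bp t ih =>
    have hkeys : d.keys = g.keys := by
      show d.items.map Prod.fst = g.items.map Prod.fst
      rw [h, List.map_map]; rfl
    have hdn : d.keys.Nodup := by rw [hkeys]; exact hn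
    simp only [List.foldl_cons]
    cases hc : g.get? bp.2 with
    | none =>
      have hgc : g.contains bp.2 = false := by
        rw [PySem.Dict.contains_eq_isSome_get?, hc]; rfl
      have hdg : d.get? bp.2 = none := by
        rw [PySem.Dict.get?_eq_none_iff_not_mem_keys] at hc ⊢
        rwa [hkeys]
      have hdc : d.contains bp.2 = false := by
        rw [PySem.Dict.contains_eq_isSome_get?, hdg]; rfl
      have hstep : pvStep cmp d bp = d.insert bp.2 bp.1 := by
        simp [pvStep, hdg]
      have hg' : (pvGStep g bp).items = g.items ++ [(bp.2, [bp.1])] := by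
        have hG : pvGStep g bp = g.insert bp.2 (g.getD bp.2 [] ++ [bp.1]) := rfl
        rw [hG, PySem.Dict.getD_of_not_contains _ _ hgc,
          PySem.Dict.items_insert_of_not_contains _ _ hgc]; rfl
      rw [hstep]
      refine ih (pvGStep g bp) (d.insert bp.2 bp.1) ?_ ?_ ?_
      · show ((pvGStep g bp).items.map Prod.fst).Nodup
        rw [hg', List.map_append]
        simp only [List.map_cons, List.map_nil]
        refine List.Nodup.append hn (List.nodup_singleton _) ?_
        intro x hx hy
        simp at hy; subst hy
        have hmem : g.contains bp.2 = true := by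
          rw [PySem.Dict.contains_iff_mem_keys]; exact hx
        rw [hgc] at hmem; exact Bool.noConfusion hmem
      · intro p hp
        rw [hg'] at hp
        rcases List.mem_append.mp hp with hp | hp
        · exact hne p hp
        · simp at hp; subst hp; simp
      · rw [PySem.Dict.items_insert_of_not_contains _ _ hdc, hg', List.map_append, h]
        simp [hred1]
    | some L =>
      have hLmem : (bp.2, L) ∈ g.items := PySem.Dict.mem_items_of_get?_eq_some _ hc
      have hLne : L ≠ [] := hne _ hLmem
      have hgc : g.contains bp.2 = true := by
        rw [PySem.Dict.contains_eq_isSome_get?, hc]; rfl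
      have hdmem : (bp.2, red L) ∈ d.items := by
        rw [h]; exact List.mem_map.mpr ⟨(bp.2, L), hLmem, rfl⟩
      have hdg : d.get? bp.2 = some (red L) :=
        PySem.Dict.get?_of_mem_items _ hdmem hdn
      have hdc : d.contains bp.2 = true := by
        rw [PySem.Dict.contains_eq_isSome_get?, hdg]; rfl
      have huniq : ∀ pl ∈ g.items, pl.1 = bp.2 → pl.2 = L := by
        intro pl hpl he
        have h1 : g.get? pl.1 = some pl.2 := PySem.Dict.get?_of_mem_items _ hpl hn
        rw [he, hc] at h1
        exact ((Option.some.injEq _ _).mp h1).symm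
      have hgetD : g.getD bp.2 [] = L := PySem.Dict.getD_of_get?_eq_some _ _ hc
      have hg' : (pvGStep g bp).items
          = g.items.map (fun p => if p.1 == bp.2 then (bp.2, L ++ [bp.1]) else p) := by
        have hG : pvGStep g bp = g.insert bp.2 (g.getD bp.2 [] ++ [bp.1]) := rfl
        rw [hG, hgetD, PySem.Dict.items_insert_of_contains _ _ hgc]
      have hn' : (pvGStep g bp).keys.Nodup := by
        show ((pvGStep g bp).items.map Prod.fst).Nodup
        rw [hg', List.map_map]
        have hfst : (Prod.fst ∘ fun p : Int × List Int => if p.1 == bp.2 then (bp.2, L ++ [bp.1]) else p)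
            = Prod.fst := by
          funext p; by_cases hb : p.1 = bp.2 <;> simp [hb]
        rw [hfst]; exact hn
      have hne' : ∀ p ∈ (pvGStep g bp).items, p.2 ≠ [] := by
        intro p hp
        rw [hg'] at hp
        rcases List.mem_map.mp hp with ⟨q, hq, hqe⟩
        by_cases hb : q.1 = bp.2
        · rw [if_pos (by simpa using hb)] at hqe; rw [← hqe]; simp
        · rw [if_neg (by simpa using hb)] at hqe; rw [← hqe]; exact hne q hq
      by_cases hcmp : cmp bp.1 (red L)
      · have hstep : pvStep cmp d bp = d.insert bp.2 bp.1 := by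
          simp [pvStep, hdg, hcmp]
        rw [hstep]
        refine ih (pvGStep g bp) _ hn' hne' ?_
        rw [PySem.Dict.items_insert_of_contains _ _ hdc, h, hg', List.map_map, List.map_map]
        refine List.map_congr_left ?_
        intro pl hpl
        by_cases hb : pl.1 = bp.2
        · have hv := huniq pl hpl hb
          simp only [Function.comp_apply, hb, beq_self_eq_true, if_true, hv,
            hred2 L bp.1 hLne, if_pos hcmp]
        · simp [Function.comp, hb]
      · have hstep : pvStep cmp d bp = d := by
          simp [pvStep, hdg, hcmp]
        rw [hstep]
        refine ih (pvGStep g bp) _ hn' hne' ?_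
        rw [h, hg', List.map_map]
        refine List.map_congr_left ?_
        intro pl hpl
        by_cases hb : pl.1 = bp.2
        · have hv := huniq pl hpl hb
          simp only [Function.comp_apply, hb, beq_self_eq_true, if_true,
            hred2 L bp.1 hLne, if_neg hcmp, hv]
        · simp [Function.comp, hb]

-- ===== VERDICT (by name: the statement is the Claim_ definition above) =====
theorem build_page_first_and_last_py_spec : Claim_equal_build_page_first_and_last_py := by
  intro l _
  show build_page_first_and_last_py l = build_page_first_and_last_py_alt l
  unfold build_page_first_and_last_py build_page_first_and_last_py_alt
  have hstepEq : (fun (fl : PySem.Dict Int Int × PySem.Dict Int Int) (bp : Int × Int) =>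
      (match fl.1.get? bp.2 with
        | none => fl.1.insert bp.2 bp.1
        | some v => if bp.1 < v then fl.1.insert bp.2 bp.1 else fl.1,
       match fl.2.get? bp.2 with
        | none => fl.2.insert bp.2 bp.1
        | some v => if v < bp.1 then fl.2.insert bp.2 bp.1 else fl.2))
    = (fun fl bp => (pvStep (fun a b => a < b) fl.1 bp, pvStep (fun a b => b < a) fl.2 bp)) := rfl
  rw [hstepEq, PySem.List.foldl_prod_mk]
  have h1 := pvFoldOne (fun a b => a < b) pyMinB pyMinB_singleton
      (fun L b hL => pyMinB_append L b hL) l PySem.Dict.empty PySem.Dict.empty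
      (by simp) (by intro p hp; simp [PySem.Dict.empty] at hp) rfl
  have h2 := pvFoldOne (fun a b => b < a) pyMaxB pyMaxB_singleton
      (fun L b hL => pyMaxB_append L b hL) l PySem.Dict.empty PySem.Dict.empty
      (by simp) (by intro p hp; simp [PySem.Dict.empty] at hp) rfl
  have hG : l.foldl (fun (g : PySem.Dict Int (List Int)) bp => g.modify bp.2 [] (fun L => L ++ [bp.1])) PySem.Dict.empty
      = l.foldl pvGStep PySem.Dict.empty := rfl
  rw [hG]
  exact Prod.ext h1 h2
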